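-- pv_equiv track=rewrite | github.com/yiduoke/Twin-Peaks | single_peak.py | find_bottom
-- ===== SOURCE A (Python) =====
-- def find_bottom(profile, remaining):
--     bottoms = set()
--     for vote in profile:
--         for candidate in reversed(vote):
--             if candidate in remaining:
--                 bottoms.add(candidate)
--                 break
--     return bottoms
-- ===== SOURCE B (Python) =====
-- def find_bottom(profile, remaining):
--     rem = set(remaining)
--     bottoms = set()
--     for vote in profile:
--         kept = [c for c in vote if c in rem]
--         if kept:
--             bottoms.add(kept[-1])
--     return bottoms
-- ===== Notes on version B (the rewrite author's own statement) =====
-- stated objective: alternative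
-- what changed: Replaces the reverse scan with early break by a forward filter of each vote against a prebuilt set, taking the last kept candidate; the last forward match equals A's first reverse match.
import Mathlib
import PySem

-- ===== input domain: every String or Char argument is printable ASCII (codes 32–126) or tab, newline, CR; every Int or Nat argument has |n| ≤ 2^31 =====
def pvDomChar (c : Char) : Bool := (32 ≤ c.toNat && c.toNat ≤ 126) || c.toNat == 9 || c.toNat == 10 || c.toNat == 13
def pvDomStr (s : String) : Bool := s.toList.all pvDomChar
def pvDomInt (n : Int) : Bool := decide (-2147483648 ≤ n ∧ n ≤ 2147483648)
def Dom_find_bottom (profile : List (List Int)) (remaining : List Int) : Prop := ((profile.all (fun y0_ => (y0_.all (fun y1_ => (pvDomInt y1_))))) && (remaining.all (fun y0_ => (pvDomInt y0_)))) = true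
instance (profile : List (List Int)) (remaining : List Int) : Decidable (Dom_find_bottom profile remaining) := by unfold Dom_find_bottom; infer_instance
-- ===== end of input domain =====

-- B replaces A's reverse scan with early break by a forward filter taking the last kept candidate; same return value.

-- ===== PORT A =====
-- inner 'for candidate in reversed(vote): if candidate in remaining: add; break'
def pvRevScan (remaining : List Int) (acc : PySem.Set Int) : List Int → PySem.Set Int
  | [] => acc
  | c :: rest => if remaining.contains c then PySem.Set.add acc c else pvRevScan remaining acc rest

def find_bottom (profile : List (List Int)) (remaining : List Int) : List Int :=
  profile.foldl (fun bottoms vote => pvRevScan remaining bottoms vote.reverse) PySem.Set.empty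

-- ===== PORT B =====
def find_bottom_alt (profile : List (List Int)) (remaining : List Int) : List Int :=
  let rem : PySem.Set Int := PySem.Set.ofList remaining
  profile.foldl (fun bottoms vote =>
    match (vote.filter (fun c => PySem.Set.contains rem c)).getLast? with
    | some x => PySem.Set.add bottoms x
    | none => bottoms) PySem.Set.empty

-- ===== PRECONDITION & SPEC =====
def Spec_find_bottom (profile : List (List Int)) (remaining : List Int) (out : List Int) : Prop := out = find_bottom_alt profile remaining
instance (profile : List (List Int)) (remaining : List Int) (out : List Int) : Decidable (Spec_find_bottom profile remaining out) := by unfold Spec_find_bottom; infer_instance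

-- ===== CLAIM (what is proved, stated in full; the proofs are below) =====
def Claim_equal_find_bottom : Prop := ∀ (profile : List (List Int)) (remaining : List Int), Dom_find_bottom profile remaining → Spec_find_bottom profile remaining (find_bottom profile remaining)

-- ===== LEMMAS AND PROOFS =====

theorem pvRevScan_eq_find? (remaining : List Int) (acc : PySem.Set Int) (l : List Int) :
    pvRevScan remaining acc l = match l.find? (fun c => remaining.contains c) with
      | some c => PySem.Set.add acc c
      | none => acc := by
  induction l with
  | nil => rfl
  | cons c rest ih =>
    simp only [pvRevScan, List.find?]
    by_cases h : c ∈ remaining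
    · simp [h]
    · simp [h, ih]

theorem pv_find?_eq_head?_filter (p : Int → Bool) (l : List Int) :
    l.find? p = (l.filter p).head? := by
  induction l with
  | nil => rfl
  | cons c rest ih =>
    by_cases h : p c = true
    · rw [List.find?_cons_of_pos h, List.filter_cons_of_pos h, List.head?_cons]
    · rw [List.find?_cons_of_neg h, List.filter_cons_of_neg h, ih]

theorem pv_contains_ofList (remaining : List Int) (c : Int) :
    PySem.Set.contains (PySem.Set.ofList remaining) c = remaining.contains c := by
  have h1 : c ∈ PySem.Set.ofList remaining ↔ c ∈ remaining := PySem.Set.mem_ofList remaining c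
  simp only [PySem.Set.contains]
  by_cases h : c ∈ remaining
  · simp [h1, h]
  · simp [h1, h]

theorem find_bottom_spec' : ∀ (profile : List (List Int)) (remaining : List Int),
    find_bottom profile remaining = find_bottom_alt profile remaining := by
  intro profile remaining
  unfold find_bottom find_bottom_alt
  simp only []
  congr 1
  funext bottoms vote
  rw [pvRevScan_eq_find?, pv_find?_eq_head?_filter]
  have hfun : (fun c => PySem.Set.contains (PySem.Set.ofList remaining) c)
      = (fun c => remaining.contains c) := by
    funext c; exact pv_contains_ofList remaining c
  rw [hfun, List.filter_reverse, List.head?_reverse]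

-- ===== VERDICT (by name: the statement is the Claim_ definition above) =====
theorem find_bottom_spec : Claim_equal_find_bottom := by
  intro profile remaining _
  exact find_bottom_spec' profile remaining
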